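-- pv_equiv track=rewrite | github.com/hetanthakkar/neetcode-solutions | maxProdSub.py | maxProd
-- ===== SOURCE A (Python) =====
-- temp=set()
--
-- def maxProd(i,nums):
--
--
--     if i==0:
--         return nums[i]
--
--     included=maxProd(i-1,nums)*nums[i]
--     excluded=maxProd(i-1,nums)
--     t=max(included,excluded)
--
--     if t==included:
--         temp.add(nums[i])
--
--     return t
-- ===== SOURCE B (Python) =====
-- # Linear DP over a single left-to-right pass instead of A's exponential double recursion.
-- # Equivalence is about the return value only: A also mutates the module-level set `temp`; B does not.
-- def maxProd(i, nums):
--     p = nums[0]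
--     for j in range(1, i + 1):
--         p = max(p * nums[j], p)
--     return p
-- ===== Notes on version B (the rewrite author's own statement) =====
-- stated objective: faster
-- what changed: Replaces the exponential double recursion (two identical recursive calls per level) with a single left-to-right loop carrying the running best product; intended as faster (measured 4.49x at n=64; A times out beyond, so a timing run could not confirm a ratio at the largest size); A's side effect on the global set `temp` is not reproduced (return-value equivalence).
import Mathlib
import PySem

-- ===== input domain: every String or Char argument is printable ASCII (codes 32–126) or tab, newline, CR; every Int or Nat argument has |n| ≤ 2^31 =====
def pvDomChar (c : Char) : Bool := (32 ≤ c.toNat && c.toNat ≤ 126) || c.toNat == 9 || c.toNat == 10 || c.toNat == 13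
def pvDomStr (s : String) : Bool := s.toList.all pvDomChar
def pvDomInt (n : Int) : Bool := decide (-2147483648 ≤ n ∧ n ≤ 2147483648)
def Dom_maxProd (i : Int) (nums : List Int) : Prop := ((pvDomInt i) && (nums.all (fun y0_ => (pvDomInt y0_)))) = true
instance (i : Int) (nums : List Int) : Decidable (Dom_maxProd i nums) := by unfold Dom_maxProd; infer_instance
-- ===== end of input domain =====

-- B replaces A's exponential double recursion with one linear pass; return-value equivalence only
-- (A also mutates the module-level set `temp`, which B does not reproduce).

-- ===== PORT A =====
-- A recurses on i; for i inside Pre_ (0 ≤ i < len nums) this is recursion on the Nat i.toNat.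
def maxProdNatA (n : Nat) (nums : List Int) : Int :=
  match n with
  | 0 => (PySem.List.pyGet? nums 0).getD 0
  | m + 1 =>
    let included := maxProdNatA m nums * (PySem.List.pyGet? nums ((m : Int) + 1)).getD 0
    let excluded := maxProdNatA m nums
    max included excluded

def maxProd (i : Int) (nums : List Int) : Int := maxProdNatA i.toNat nums

-- ===== PORT B =====
def maxProd_alt (i : Int) (nums : List Int) : Int :=
  (PySem.List.pyRange 1 (i + 1) 1).foldl
    (fun p j => max (p * (PySem.List.pyGet? nums j).getD 0) p)
    ((PySem.List.pyGet? nums 0).getD 0)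

-- ===== PRECONDITION & SPEC =====
-- A raises (IndexError for i ≥ len, unbounded recursion for i < 0) outside 0 ≤ i < len nums.
def Pre_maxProd (i : Int) (nums : List Int) : Prop := 0 ≤ i ∧ i < nums.length
instance (i : Int) (nums : List Int) : Decidable (Pre_maxProd i nums) := by unfold Pre_maxProd; infer_instance
def pvWitness_maxProd : Int × List Int := (1, [3, -2])

def Spec_maxProd (i : Int) (nums : List Int) (out : Int) : Prop := out = maxProd_alt i nums
instance (i : Int) (nums : List Int) (out : Int) : Decidable (Spec_maxProd i nums out) := by unfold Spec_maxProd; infer_instance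

-- ===== CLAIM (what is proved, stated in full; the proofs are below) =====
def Claim_equal_maxProd : Prop := ∀ (i : Int) (nums : List Int), Dom_maxProd i nums → Pre_maxProd i nums → Spec_maxProd i nums (maxProd i nums)

-- ===== LEMMAS AND PROOFS =====
theorem maxProdNatA_eq_foldl (n : Nat) (nums : List Int) :
    maxProdNatA n nums =
      (PySem.List.pyRange 1 ((n : Int) + 1) 1).foldl
        (fun p j => max (p * (PySem.List.pyGet? nums j).getD 0) p)
        ((PySem.List.pyGet? nums 0).getD 0) := by
  induction n with
  | zero =>
      simp [maxProdNatA, PySem.List.pyRange_one_eq_nil]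
  | succ m ih =>
      have h : PySem.List.pyRange 1 ((m : Int) + 1 + 1) 1 =
          PySem.List.pyRange 1 ((m : Int) + 1) 1 ++ [(m : Int) + 1] :=
        PySem.List.pyRange_one_succ_right (by omega)
      simp only [maxProdNatA, Nat.cast_succ] at *
      rw [h, List.foldl_append, ← ih]
      simp [max_comm]

-- ===== VERDICT (by name: the statement is the Claim_ definition above) =====
theorem maxProd_spec : Claim_equal_maxProd := by
  intro i nums _ hpre
  unfold Pre_maxProd at hpre
  unfold Spec_maxProd maxProd maxProd_alt
  rw [maxProdNatA_eq_foldl]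
  congr 2
  omega
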